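-- pv_equiv track=rewrite | github.com/farmsim/farms_mujoco | farms_bullet/model/control.py | joints_from_control_types
-- ===== SOURCE A (Python) =====
-- from typing import List, Dict
-- from enum import IntEnum
--
-- class ControlType(IntEnum):
--     """Control type"""
--     POSITION = 0
--     VELOCITY = 1
--     TORQUE = 2
--
-- def joints_from_control_types(
--         joints_names: List[str],
--         joints_control_types: Dict[str, ControlType],
-- ):
--     """From control types"""
--     return [
--         [
--             joint
--             for joint in joints_names
--             if joints_control_types[joint] == control_type
--         ]
--         for control_type in list(ControlType)
--     ]
-- ===== SOURCE B (Python) =====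
-- from typing import List, Dict
-- from enum import IntEnum
--
-- class ControlType(IntEnum):
--     """Control type"""
--     POSITION = 0
--     VELOCITY = 1
--     TORQUE = 2
--
-- def joints_from_control_types(
--         joints_names: List[str],
--         joints_control_types: Dict[str, ControlType],
-- ):
--     """From control types: single grouping pass instead of one scan per type"""
--     groups = {control_type: [] for control_type in ControlType}
--     for joint in joints_names:
--         control_type = joints_control_types[joint]
--         if control_type in groups:
--             groups[control_type].append(joint)
--     return [groups[control_type] for control_type in ControlType]
-- ===== Notes on version B (the rewrite author's own statement) =====
-- stated objective: simpler
-- what changed: Replaces the three separate filtering scans of joints_names (one per ControlType) by a single grouping pass that appends each joint to its type's pre-seeded bucket.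
import Mathlib
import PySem

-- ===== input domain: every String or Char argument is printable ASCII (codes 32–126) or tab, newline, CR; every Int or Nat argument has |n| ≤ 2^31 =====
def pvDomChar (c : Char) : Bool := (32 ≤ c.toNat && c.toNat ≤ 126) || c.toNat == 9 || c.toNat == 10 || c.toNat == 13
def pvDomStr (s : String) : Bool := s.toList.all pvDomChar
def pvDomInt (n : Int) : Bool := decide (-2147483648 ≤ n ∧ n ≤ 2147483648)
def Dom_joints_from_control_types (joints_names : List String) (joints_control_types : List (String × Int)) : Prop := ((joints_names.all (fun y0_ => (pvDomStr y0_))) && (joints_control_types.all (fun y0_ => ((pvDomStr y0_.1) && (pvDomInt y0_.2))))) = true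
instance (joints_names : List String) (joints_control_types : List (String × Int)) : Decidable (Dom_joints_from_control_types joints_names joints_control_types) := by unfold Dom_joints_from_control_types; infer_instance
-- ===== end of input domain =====

-- B groups the joints in ONE pass into three pre-seeded buckets instead of A's three filtering scans (objective: simpler).

-- ===== PORT A =====
-- '[joint for joint in joints_names if joints_control_types[joint] == control_type] for control_type in list(ControlType)'
-- dict lookup = first match in the association list; a missing key raises KeyError in Python (excluded by Pre_),
-- here the comparison 'none == some ct' is simply false.
def joints_from_control_types (joints_names : List String) (joints_control_types : List (String × Int)) : List (List String) :=
  ([0, 1, 2] : List Int).map (fun control_type =>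
    joints_names.filter (fun joint => joints_control_types.lookup joint == some control_type))

-- ===== PORT B =====
-- one pass: append each joint to the bucket of its control type (0/1/2), ignore other values;
-- a missing key raises KeyError in Python B too (excluded by Pre_), here the 'none' branch keeps the state.
def jfct_step (joints_control_types : List (String × Int))
    (acc : List String × List String × List String) (joint : String) :
    List String × List String × List String :=
  match joints_control_types.lookup joint with
  | some ct =>
      if ct == 0 then (acc.1 ++ [joint], acc.2.1, acc.2.2)
      else if ct == 1 then (acc.1, acc.2.1 ++ [joint], acc.2.2)
      else if ct == 2 then (acc.1, acc.2.1, acc.2.2 ++ [joint])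
      else acc
  | none => acc

def joints_from_control_types_alt (joints_names : List String) (joints_control_types : List (String × Int)) : List (List String) :=
  let g := joints_names.foldl (jfct_step joints_control_types) ([], [], [])
  [g.1, g.2.1, g.2.2]

-- ===== PRECONDITION & SPEC =====
-- Pre_: every joint name must be a key of the dict, otherwise the Python A (and B) raises KeyError.
def Pre_joints_from_control_types (joints_names : List String) (joints_control_types : List (String × Int)) : Prop :=
  ∀ joint ∈ joints_names, joint ∈ joints_control_types.map Prod.fst
instance (joints_names : List String) (joints_control_types : List (String × Int)) : Decidable (Pre_joints_from_control_types joints_names joints_control_types) := by unfold Pre_joints_from_control_types; infer_instance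

def pvWitness_joints_from_control_types : List String × (List (String × Int)) :=
  (["hip", "knee", "ankle"], [("hip", 0), ("knee", 2), ("ankle", 0)])

def Spec_joints_from_control_types (joints_names : List String) (joints_control_types : List (String × Int)) (out : List (List String)) : Prop := out = joints_from_control_types_alt joints_names joints_control_types
instance (joints_names : List String) (joints_control_types : List (String × Int)) (out : List (List String)) : Decidable (Spec_joints_from_control_types joints_names joints_control_types out) := by unfold Spec_joints_from_control_types; infer_instance

-- ===== CLAIM (what is proved, stated in full; the proofs are below) =====
def Claim_equal_joints_from_control_types : Prop := ∀ (joints_names : List String) (joints_control_types : List (String × Int)), Dom_joints_from_control_types joints_names joints_control_types → Pre_joints_from_control_types joints_names joints_control_types → Spec_joints_from_control_types joints_names joints_control_types (joints_from_control_types joints_names joints_control_types)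

-- ===== LEMMAS AND PROOFS =====

-- B's fold appends each filtered prefix to the running buckets.
theorem jfct_fold_inv (joints_control_types : List (String × Int)) :
    ∀ (names : List String) (p v t : List String),
      names.foldl (jfct_step joints_control_types) (p, v, t) =
        (p ++ names.filter (fun j => joints_control_types.lookup j == some 0),
         v ++ names.filter (fun j => joints_control_types.lookup j == some 1),
         t ++ names.filter (fun j => joints_control_types.lookup j == some 2)) := by
  intro names
  induction names with
  | nil => simp
  | cons j rest ih =>
      intro p v t
      simp only [List.foldl_cons, jfct_step]
      cases h : joints_control_types.lookup j with
      | none => simp [ih, h]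
      | some ct =>
          by_cases h0 : ct = 0
          · simp [h0, ih, h]
          · by_cases h1 : ct = 1
            · simp [h1, ih, h]
            · by_cases h2 : ct = 2
              · simp [h2, ih, h]
              · simp [h0, h1, h2, ih, h]

-- ===== VERDICT (by name: the statement is the Claim_ definition above) =====
theorem joints_from_control_types_spec : Claim_equal_joints_from_control_types := by
  intro joints_names joints_control_types _ _
  unfold Spec_joints_from_control_types joints_from_control_types joints_from_control_types_alt
  rw [jfct_fold_inv]
  simp
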